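-- pv_equiv track=rewrite | github.com/btmorgeson/preHackathon_jobReq_prototype | src/graph/hybrid_retriever.py | _parse_evidence_response
-- ===== SOURCE A (Python) =====
-- def _parse_evidence_response(
--
--     response_text: str,
--     candidate_ids: list[str],
--     fallback: dict[str, str],
-- ) -> dict[str, str]:
--     """Parse batched LLM response by CANDIDATE N: markers."""
--     evidence_map: dict[str, str] = {}
--     for i, pid in enumerate(candidate_ids, start=1):
--         marker = f"CANDIDATE {i}:"
--         next_marker = f"CANDIDATE {i + 1}:"
--         start_idx = response_text.find(marker)
--         if start_idx == -1:
--             evidence_map[pid] = fallback.get(pid, "")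
--             continue
--         start_idx += len(marker)
--         end_idx = (
--             response_text.find(next_marker)
--             if i < len(candidate_ids)
--             else len(response_text)
--         )
--         evidence_map[pid] = response_text[start_idx:end_idx].strip()
--     return evidence_map
-- ===== SOURCE B (Python) =====
-- def _parse_evidence_response(
--     response_text: str,
--     candidate_ids: list[str],
--     fallback: dict[str, str],
-- ) -> dict[str, str]:
--     """Parse batched LLM response: one scan records the first position of every
--     'CANDIDATE <digits>:' marker, then each candidate's evidence is the slice
--     between its marker and the next one."""
--     n = len(response_text)
--     pos = {}  # digit run -> (marker start, evidence start), first occurrence wins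
--     for p in range(n):
--         if response_text.startswith("CANDIDATE ", p):
--             q = p + 10
--             r = q
--             while r < n and response_text[r].isdigit():
--                 r += 1
--             if r > q and r < n and response_text[r] == ':' and response_text[q:r] not in pos:
--                 pos[response_text[q:r]] = (p, r + 1)
--     k = len(candidate_ids)
--     result = {}
--     for i, pid in enumerate(candidate_ids, start=1):
--         m = pos.get(str(i))
--         if m is None:
--             result[pid] = fallback.get(pid, "")
--         else:
--             if i < k:
--                 nxt = pos.get(str(i + 1))
--                 end = nxt[0] if nxt is not None else n
--             else:
--                 end = n
--             result[pid] = response_text[m[1]:end].strip()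
--     return result
-- ===== Notes on version B (the rewrite author's own statement) =====
-- stated objective: faster
-- what changed: B replaces A's per-candidate full-text find() calls by one left-to-right scan of the text that records the first position of every 'CANDIDATE <digits>:' marker in a dict, then slices each candidate's evidence between its marker and the next one.
-- intended difference: On inputs where some id's last occurrence is a non-last candidate whose 'CANDIDATE i:' marker is present while 'CANDIDATE i+1:' is missing and the text does not end in whitespace, A's find() returns -1 which it uses as a slice end, silently dropping the text's last character from that candidate's evidence; B slices to the end of the text, which is the intended evidence. — e.g. on _parse_evidence_response("CANDIDATE 1: evx", ["a", "b"], []): A returns [("a", "ev"), ("b", "")], B returns [("a", "evx"), ("b", "")]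
import Mathlib
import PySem

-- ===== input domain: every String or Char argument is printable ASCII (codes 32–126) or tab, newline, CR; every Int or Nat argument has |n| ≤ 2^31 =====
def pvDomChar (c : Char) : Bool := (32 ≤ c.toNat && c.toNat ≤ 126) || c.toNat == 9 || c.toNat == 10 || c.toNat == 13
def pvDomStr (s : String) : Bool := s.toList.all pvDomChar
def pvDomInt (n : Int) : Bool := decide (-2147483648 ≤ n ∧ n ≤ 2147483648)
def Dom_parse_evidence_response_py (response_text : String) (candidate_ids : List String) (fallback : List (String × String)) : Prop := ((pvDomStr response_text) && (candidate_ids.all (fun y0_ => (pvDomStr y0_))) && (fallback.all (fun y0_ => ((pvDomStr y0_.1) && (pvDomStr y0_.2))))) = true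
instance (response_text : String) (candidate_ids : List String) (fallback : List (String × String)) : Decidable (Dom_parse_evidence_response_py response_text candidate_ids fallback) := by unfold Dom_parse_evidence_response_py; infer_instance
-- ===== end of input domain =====

-- B replaces A's per-candidate full-text find() calls (O(k*n)) by a single scan of the
-- text recording the first position of every 'CANDIDATE <digits>:' marker (O(n+k));
-- outside D_ below the two agree exactly.

-- ===== PORT A =====
-- f"CANDIDATE {i}:" as a character list (str(i) = PySem.Int.toChars i)
def pvMarker (i : Int) : List Char := "CANDIDATE ".toList ++ PySem.Int.toChars i ++ [':']

def parse_evidence_response_py (response_text : String) (candidate_ids : List String) (fallback : List (String × String)) : List (String × String) :=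
  let t := response_text.toList
  let fbd := PySem.Dict.ofList fallback
  let em := (PySem.List.enumerate candidate_ids 1).foldl (fun em p =>
    let i := p.1
    let pid := p.2
    let marker := pvMarker i
    let next_marker := pvMarker (i + 1)
    let start_idx := PySem.Chars.find t marker
    if start_idx = -1 then
      em.insert pid (fbd.getD pid "")
    else
      let start_idx := start_idx + (marker.length : Int)
      let end_idx := if i < (candidate_ids.length : Int) then PySem.Chars.find t next_marker else (t.length : Int)
      em.insert pid (String.ofList (PySem.Chars.strip (PySem.List.slice t (some start_idx) (some end_idx))))
    ) PySem.Dict.empty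
  em.items

-- ===== PORT B =====
-- the inner `while r < n and response_text[r].isdigit(): r += 1` (structural fuel n - r)
def pvRunEndGo (t : List Char) : Nat → Nat → Nat
  | 0, r => r
  | f + 1, r =>
    match t[r]? with
    | some c => if PySem.Chars.isdigit c then pvRunEndGo t f (r + 1) else r
    | none => r

def pvRunEnd (t : List Char) (r : Nat) : Nat := pvRunEndGo t (t.length - r) r

-- body of Source B's scanning loop; response_text.startswith("CANDIDATE ", p) is exact as
-- startswith on t.drop p.toNat since the loop gives 0 ≤ p < n
def pvScanStep (t : List Char) (pos : PySem.Dict String (Int × Int)) (p : Int) : PySem.Dict String (Int × Int) :=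
  if PySem.Chars.startswith (t.drop p.toNat) "CANDIDATE ".toList then
    let q := p.toNat + 10
    let r := pvRunEnd t q
    let run := String.ofList (PySem.List.slice t (some (q : Int)) (some (r : Int)))
    if q < r ∧ r < t.length ∧ t[r]? = some ':' ∧ pos.contains run = false then
      pos.insert run (p, (r : Int) + 1)
    else pos
  else pos

-- Source B's first loop: first position of every 'CANDIDATE <digits>:' marker, keyed by the digit run
def pvScan (t : List Char) : PySem.Dict String (Int × Int) :=
  (PySem.List.pyRange 0 (t.length : Int) 1).foldl (pvScanStep t) PySem.Dict.empty

def parse_evidence_response_py_alt (response_text : String) (candidate_ids : List String) (fallback : List (String × String)) : List (String × String) :=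
  let t := response_text.toList
  let n := t.length
  let pos := pvScan t
  let k := candidate_ids.length
  let result := (PySem.List.enumerate candidate_ids 1).foldl (fun res p =>
    let i := p.1
    let pid := p.2
    match pos.get? (PySem.Int.toStr i) with
    | none => res.insert pid ((PySem.Dict.ofList fallback).getD pid "")
    | some m =>
      let endIdx : Int :=
        if i < (k : Int) then
          match pos.get? (PySem.Int.toStr (i + 1)) with
          | some nxt => nxt.1
          | none => (n : Int)
        else (n : Int)
      res.insert pid (String.ofList (PySem.Chars.strip (PySem.List.slice t (some m.2) (some endIdx))))
    ) PySem.Dict.empty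
  result.items

-- ===== PRECONDITION & SPEC =====
-- On inputs where some id's last occurrence is a non-last candidate whose marker occurs before
-- the text's last character while the next marker is missing and the text does not end in
-- whitespace, A uses find() = -1
-- as a slice end and silently drops the text's last character from that candidate's evidence;
-- B slices to the end of the text, which is the intended evidence.
def D_parse_evidence_response_py (response_text : String) (candidate_ids : List String) (fallback : List (String × String)) : Prop :=
  ∃ j ∈ List.range candidate_ids.length,
    j + 1 < candidate_ids.length ∧
    candidate_ids.getD j "" ∉ candidate_ids.drop (j + 1) ∧
    PySem.Chars.isIn (pvMarker ((j : Int) + 1)) response_text.toList.dropLast = true ∧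
    PySem.Chars.isIn (pvMarker ((j : Int) + 2)) response_text.toList = false ∧
    PySem.Chars.isspace (response_text.toList.getLastD ' ') = false

instance (response_text : String) (candidate_ids : List String) (fallback : List (String × String)) : Decidable (D_parse_evidence_response_py response_text candidate_ids fallback) := by unfold D_parse_evidence_response_py; infer_instance

def Spec_parse_evidence_response_py (response_text : String) (candidate_ids : List String) (fallback : List (String × String)) (out : List (String × String)) : Prop := ¬ D_parse_evidence_response_py response_text candidate_ids fallback → out = parse_evidence_response_py_alt response_text candidate_ids fallback
instance (response_text : String) (candidate_ids : List String) (fallback : List (String × String)) (out : List (String × String)) : Decidable (Spec_parse_evidence_response_py response_text candidate_ids fallback out) := by unfold Spec_parse_evidence_response_py; infer_instance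

def pvDiffWitness_parse_evidence_response_py : String × List String × (List (String × String)) := ("CANDIDATE 1: evx", ["a", "b"], [])
def pvDiffWitnessOut_parse_evidence_response_py : (List (String × String)) × (List (String × String)) := ([("a", "ev"), ("b", "")], [("a", "evx"), ("b", "")])

-- ===== CLAIM (what is proved, stated in full; the proofs are below) =====
def Claim_unchanged_parse_evidence_response_py : Prop := ∀ (response_text : String) (candidate_ids : List String) (fallback : List (String × String)), Dom_parse_evidence_response_py response_text candidate_ids fallback → Spec_parse_evidence_response_py response_text candidate_ids fallback (parse_evidence_response_py response_text candidate_ids fallback)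
def Claim_changed_parse_evidence_response_py : Prop := Dom_parse_evidence_response_py (pvDiffWitness_parse_evidence_response_py.1) (pvDiffWitness_parse_evidence_response_py.2.1) (pvDiffWitness_parse_evidence_response_py.2.2) ∧ D_parse_evidence_response_py (pvDiffWitness_parse_evidence_response_py.1) (pvDiffWitness_parse_evidence_response_py.2.1) (pvDiffWitness_parse_evidence_response_py.2.2) ∧ parse_evidence_response_py (pvDiffWitness_parse_evidence_response_py.1) (pvDiffWitness_parse_evidence_response_py.2.1) (pvDiffWitness_parse_evidence_response_py.2.2) = pvDiffWitnessOut_parse_evidence_response_py.1 ∧ parse_evidence_response_py_alt (pvDiffWitness_parse_evidence_response_py.1) (pvDiffWitness_parse_evidence_response_py.2.1) (pvDiffWitness_parse_evidence_response_py.2.2) = pvDiffWitnessOut_parse_evidence_response_py.2 ∧ pvDiffWitnessOut_parse_evidence_response_py.1 ≠ pvDiffWitnessOut_parse_evidence_response_py.2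


def Claim_exact_parse_evidence_response_py : Prop := ∀ (response_text : String) (candidate_ids : List String) (fallback : List (String × String)), Dom_parse_evidence_response_py response_text candidate_ids fallback → D_parse_evidence_response_py response_text candidate_ids fallback → parse_evidence_response_py response_text candidate_ids fallback ≠ parse_evidence_response_py_alt response_text candidate_ids fallback

-- ===== LEMMAS AND PROOFS =====

-- characterization of the while-loop pvRunEnd as a takeWhile
lemma pvRunEndGo_eq (t : List Char) : ∀ (f r : Nat), t.length - r ≤ f →
    pvRunEndGo t f r = r + ((t.drop r).takeWhile PySem.Chars.isdigit).length := by
  intro f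
  induction f with
  | zero =>
    intro r h
    have hle : t.length ≤ r := by omega
    simp [pvRunEndGo, List.drop_eq_nil_of_le hle]
  | succ f ih =>
    intro r h
    cases hr : t[r]? with
    | none =>
      have hle : t.length ≤ r := by
        by_contra hlt
        exact absurd hr (by simp [List.getElem?_eq_getElem (by omega : r < t.length)])
      simp [pvRunEndGo, hr, List.drop_eq_nil_of_le hle]
    | some c =>
      have hrlt : r < t.length := by
        by_contra hlt
        simp [List.getElem?_eq_none_iff.mpr (by omega : t.length ≤ r)] at hr
      have hc : t[r] = c := by simpa [List.getElem?_eq_getElem hrlt] using hr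
      have hdrop : t.drop r = c :: t.drop (r + 1) := by
        rw [List.drop_eq_getElem_cons hrlt, hc]
      by_cases hd : PySem.Chars.isdigit c
      · have := ih (r + 1) (by omega)
        simp [pvRunEndGo, hr, hd, hdrop, this, List.takeWhile_cons]
        omega
      · simp [pvRunEndGo, hr, hd, hdrop, List.takeWhile_cons]

lemma pvRunEnd_eq (t : List Char) (r : Nat) :
    pvRunEnd t r = r + ((t.drop r).takeWhile PySem.Chars.isdigit).length := by
  exact pvRunEndGo_eq t (t.length - r) r le_rfl

lemma pvTakeWhile_all_append (p : Char → Bool) (s : List Char) (x : Char) (rest : List Char)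
    (hs : ∀ c ∈ s, p c = true) (hx : p x = false) :
    (s ++ x :: rest).takeWhile p = s := by
  induction s with
  | nil => simp [List.takeWhile_cons, hx]
  | cons a l ih =>
    have ha : p a = true := hs a (by simp)
    simp [List.takeWhile_cons, ha, ih (fun c hc => hs c (by simp [hc]))]

-- digit characters of str(i)
lemma pvDigitChar_isdigit (m : Nat) (h : m < 10) : PySem.Chars.isdigit (Nat.digitChar m) = true := by
  interval_cases m <;> decide

lemma pvToDigitsCore_mem : ∀ (f n : Nat) (acc : List Char) (c : Char),
    c ∈ Nat.toDigitsCore 10 f n acc → c ∈ acc ∨ PySem.Chars.isdigit c = true := by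
  intro f
  induction f with
  | zero => intro n acc c hc; exact Or.inl (by simpa [Nat.toDigitsCore] using hc)
  | succ f ih =>
    intro n acc c hc
    simp only [Nat.toDigitsCore] at hc
    by_cases hz : n / 10 = 0
    · simp [hz] at hc
      rcases hc with hc | hc
      · exact Or.inr (hc ▸ pvDigitChar_isdigit _ (Nat.mod_lt _ (by norm_num)))
      · exact Or.inl hc
    · simp only [hz, if_false] at hc
      rcases ih (n / 10) ((n % 10).digitChar :: acc) c hc with hm | hm
      · rcases List.mem_cons.mp hm with hm | hm
        · exact Or.inr (hm ▸ pvDigitChar_isdigit _ (Nat.mod_lt _ (by norm_num)))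
        · exact Or.inl hm
      · exact Or.inr hm

lemma pvToDigitsCore_len : ∀ (f n : Nat) (acc : List Char), 1 ≤ f →
    acc.length + 1 ≤ (Nat.toDigitsCore 10 f n acc).length := by
  intro f
  induction f with
  | zero => intro n acc h; omega
  | succ f ih =>
    intro n acc _
    simp only [Nat.toDigitsCore]
    by_cases hz : n / 10 = 0
    · simp [hz]
    · simp only [hz, if_false]
      cases f with
      | zero => simp [Nat.toDigitsCore]
      | succ f =>
        have := ih (n / 10) ((n % 10).digitChar :: acc) (by omega)
        simp at this
        omega

lemma pvToChars_ne_nil (i : Int) (hi : 1 ≤ i) : PySem.Int.toChars i ≠ [] := by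
  have hneg : ¬ i < 0 := by omega
  simp only [PySem.Int.toChars, hneg, if_false, Nat.toDigits]
  intro h
  have := pvToDigitsCore_len (i.toNat + 1) i.toNat [] (by omega)
  rw [h] at this
  simp at this

lemma pvToChars_digits (i : Int) (hi : 1 ≤ i) :
    ∀ c ∈ PySem.Int.toChars i, PySem.Chars.isdigit c = true := by
  have hneg : ¬ i < 0 := by omega
  intro c hc
  simp only [PySem.Int.toChars, hneg, if_false, Nat.toDigits] at hc
  rcases pvToDigitsCore_mem (i.toNat + 1) i.toNat [] c hc with hm | hm
  · simp at hm
  · exact hm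

-- the last index of x in ids
def pvLastIdx (ids : List String) (x : String) : Option Nat :=
  match ids with
  | [] => none
  | y :: l =>
    match pvLastIdx l x with
    | some j => some (j + 1)
    | none => if y = x then some 0 else none

lemma pvLastIdx_spec (x : String) : ∀ (ids : List String) (j : Nat), pvLastIdx ids x = some j →
    j < ids.length ∧ ids.getD j "" = x ∧ x ∉ ids.drop (j + 1) := by
  intro ids
  induction ids with
  | nil => intro j h; simp [pvLastIdx] at h
  | cons y l ih =>
    intro j h
    simp only [pvLastIdx] at h
    cases hl : pvLastIdx l x with
    | some j' =>
      rw [hl] at h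
      simp only [Option.some.injEq] at h
      subst h
      obtain ⟨h1, h2, h3⟩ := ih j' hl
      refine ⟨by simpa using Nat.succ_lt_succ h1, by simpa using h2, by simpa using h3⟩
    | none =>
      rw [hl] at h
      by_cases hyx : y = x
      · simp only [hyx, if_true, Option.some.injEq] at h
        subst h
        refine ⟨by simp, by simpa using hyx, ?_⟩
        intro hmem
        have : pvLastIdx l x ≠ none := by
          clear hl ih
          induction l with
          | nil => simp at hmem
          | cons z l2 ih2 =>
            simp only [pvLastIdx]
            rcases List.mem_cons.mp (by simpa using hmem) with hz | hz
            · cases h2 : pvLastIdx l2 x <;> simp [h2, hz]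
            · cases h2 : pvLastIdx l2 x with
              | some j2 => simp [h2]
              | none => exact absurd h2 (ih2 (by simpa using hz))
        exact this hl
      · simp [hyx] at h


-- scanner-hit predicate: position p records the digit run of σ
def pvHitB (t : List Char) (σ : String) (p : Nat) : Bool :=
  PySem.Chars.startswith (t.drop p) "CANDIDATE ".toList &&
  decide (p + 10 < pvRunEnd t (p + 10)) &&
  decide (pvRunEnd t (p + 10) < t.length) &&
  (t[pvRunEnd t (p + 10)]? == some ':') &&
  (String.ofList (PySem.List.slice t (some ((p + 10 : Nat) : Int)) (some ((pvRunEnd t (p + 10) : Nat) : Int))) == σ)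

lemma pvSlice_natCast (xs : List Char) (a b : Nat) :
    PySem.List.slice xs (some (a : Int)) (some (b : Int)) = (xs.drop a).take (b - a) := by
  rw [PySem.List.slice_toNat _ (by positivity) (by positivity)]
  simp

lemma pvDrop_takeWhile (p : Char → Bool) (l : List Char) :
    l.drop (l.takeWhile p).length = l.dropWhile p := by
  induction l with
  | nil => simp
  | cons a l ih =>
    by_cases h : p a
    · simpa [List.takeWhile_cons, h] using ih
    · simp [List.takeWhile_cons, List.dropWhile_cons, h]

lemma pvTake_takeWhile (p : Char → Bool) (l : List Char) :
    l.take (l.takeWhile p).length = l.takeWhile p := by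
  induction l with
  | nil => simp
  | cons a l ih =>
    by_cases h : p a
    · simpa [List.takeWhile_cons, h] using ih
    · simp [h]

lemma pvDrop_pat (t w : List Char) (p : Nat) (hw : "CANDIDATE ".toList ++ w = t.drop p) :
    t.drop (p + 10) = w := by
  have h := congrArg (List.drop 10) hw
  rw [List.drop_drop] at h
  rw [← h]
  simpa using List.drop_left (l₁ := "CANDIDATE ".toList) (l₂ := w)

-- facts at a marker occurrence
lemma pvHit_facts (t s u : List Char) (p : Nat)
    (hd : ∀ c ∈ s, PySem.Chars.isdigit c = true)
    (hu : t.drop (p + 10) = s ++ ':' :: u) :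
    pvRunEnd t (p + 10) = p + 10 + s.length ∧
    t[p + 10 + s.length]? = some ':' ∧
    PySem.List.slice t (some ((p + 10 : Nat) : Int)) (some ((p + 10 + s.length : Nat) : Int)) = s := by
  have hcol : PySem.Chars.isdigit ':' = false := by decide
  have htw : (t.drop (p + 10)).takeWhile PySem.Chars.isdigit = s := by
    rw [hu]; exact pvTakeWhile_all_append _ _ _ _ hd hcol
  have hre : pvRunEnd t (p + 10) = p + 10 + s.length := by
    rw [pvRunEnd_eq, htw]
  refine ⟨hre, ?_, ?_⟩
  · have hds : t.drop (p + 10 + s.length) = ':' :: u := by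
      have h1 : (t.drop (p + 10)).drop s.length = t.drop (p + 10 + s.length) := by
        rw [List.drop_drop]; try (congr 1; omega)
      rw [← h1, hu]
      simpa using List.drop_left (l₁ := s) (l₂ := ':' :: u)
    rw [← List.head?_drop, hds]
    rfl
  · rw [pvSlice_natCast, hu]
    have h2 : p + 10 + s.length - (p + 10) = s.length := by omega
    rw [h2]
    simpa using List.take_left (l₁ := s) (l₂ := ':' :: u)

lemma pvHitB_iff (t s : List Char) (p : Nat) (hs : s ≠ [])
    (hd : ∀ c ∈ s, PySem.Chars.isdigit c = true) :
    pvHitB t (String.ofList s) p = true ↔ ("CANDIDATE ".toList ++ (s ++ [':'])) <+: t.drop p := by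
  constructor
  · intro h
    simp only [pvHitB, Bool.and_eq_true, decide_eq_true_eq, beq_iff_eq] at h
    obtain ⟨⟨⟨⟨hsw, hqr⟩, hrn⟩, hcol⟩, hrun⟩ := h
    obtain ⟨w, hw⟩ := (PySem.Chars.startswith_iff _ _).mp hsw
    have hw10 : t.drop (p + 10) = w := pvDrop_pat t w p hw
    set tw := w.takeWhile PySem.Chars.isdigit with htw
    have hre : pvRunEnd t (p + 10) = p + 10 + tw.length := by
      rw [pvRunEnd_eq, hw10]
    have hslice : PySem.List.slice t (some ((p + 10 : Nat) : Int)) (some ((pvRunEnd t (p + 10) : Nat) : Int)) = tw := by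
      rw [pvSlice_natCast, hre, hw10]
      have h3 : p + 10 + tw.length - (p + 10) = tw.length := by omega
      rw [h3]
      exact pvTake_takeWhile _ w
    have hts : tw = s := by
      have h4 := hrun
      rw [hslice] at h4
      have h5 := congrArg String.toList h4
      simpa using h5
    have hdw : w.dropWhile PySem.Chars.isdigit = ':' :: (t.drop (p + 10 + tw.length + 1)) := by
      have h1 : t.drop (p + 10 + tw.length) = w.dropWhile PySem.Chars.isdigit := by
        have h6 : (t.drop (p + 10)).drop tw.length = t.drop (p + 10 + tw.length) := by
          rw [List.drop_drop]; try (congr 1; omega)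
        rw [← h6, hw10, pvDrop_takeWhile]
      have h2 : (w.dropWhile PySem.Chars.isdigit).head? = some ':' := by
        rw [← h1, List.head?_drop, ← hre, hcol]
      cases hdd : w.dropWhile PySem.Chars.isdigit with
      | nil => rw [hdd] at h2; simp at h2
      | cons c u =>
        rw [hdd] at h2
        simp only [List.head?_cons, Option.some.injEq] at h2
        subst h2
        congr 1
        have h7 := congrArg (List.drop 1) h1
        rw [List.drop_drop, hdd] at h7
        simpa [(by omega : p + 10 + tw.length + 1 = 1 + (p + 10 + tw.length))] using h7.symm
    refine ⟨t.drop (p + 10 + tw.length + 1), ?_⟩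
    have h8 : w = tw ++ w.dropWhile PySem.Chars.isdigit := (List.takeWhile_append_dropWhile).symm
    calc "CANDIDATE ".toList ++ (s ++ [':']) ++ t.drop (p + 10 + tw.length + 1)
        = "CANDIDATE ".toList ++ (tw ++ (':' :: (t.drop (p + 10 + tw.length + 1)))) := by
          rw [hts]; simp
      _ = "CANDIDATE ".toList ++ w := by rw [← hdw, ← h8]
      _ = t.drop p := hw
  · intro hpre
    obtain ⟨u0, hu0⟩ := hpre
    have hw10 : t.drop (p + 10) = s ++ ':' :: u0 := by
      apply pvDrop_pat t _ p
      rw [← hu0]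
      simp
    obtain ⟨hre, hcol, hslice⟩ := pvHit_facts t s u0 p hd hw10
    have hsw : PySem.Chars.startswith (t.drop p) "CANDIDATE ".toList = true := by
      rw [PySem.Chars.startswith_iff]
      exact ⟨(s ++ [':']) ++ u0, by rw [← hu0]; simp⟩
    have hlen : 0 < s.length := List.length_pos_iff.mpr hs
    have hrn : pvRunEnd t (p + 10) < t.length := by
      rw [hre]
      by_contra hge
      rw [List.getElem?_eq_none_iff.mpr (by omega)] at hcol
      exact absurd hcol (by simp)
    simp only [pvHitB, Bool.and_eq_true, decide_eq_true_eq, beq_iff_eq]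
    exact ⟨⟨⟨⟨hsw, by omega⟩, hrn⟩, by rw [hre]; exact hcol⟩, by rw [hre, hslice]⟩

-- find? over List.range picks the least index
lemma pvFind?_range_none (P : Nat → Bool) (n : Nat) (h : ∀ i, i < n → P i = false) :
    (List.range n).find? P = none :=
  List.find?_eq_none.mpr (fun x hx => by simp [h x (List.mem_range.mp hx)])

lemma pvFind?_range_some (P : Nat → Bool) (n m : Nat) (hm : m < n) (hP : P m = true)
    (hmin : ∀ i, i < m → P i = false) : (List.range n).find? P = some m := by
  induction n with
  | zero => omega
  | succ n ih =>
    rw [List.range_succ, List.find?_append]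
    by_cases hmn : m < n
    · rw [ih hmn]; rfl
    · have : m = n := by omega
      subst this
      rw [pvFind?_range_none P m hmin]
      simp [hP]



lemma pvScanStep_get_some (t : List Char) (D : PySem.Dict String (Int × Int)) (p : Int)
    (σ : String) (v : Int × Int) (h : D.get? σ = some v) :
    (pvScanStep t D p).get? σ = some v := by
  simp only [pvScanStep]
  split_ifs with h1 h2
  · by_cases hrun : String.ofList (PySem.List.slice t (some (p.toNat + 10 : Nat)) (some (pvRunEnd t (p.toNat + 10) : Nat))) = σ
    · exfalso
      have hcf := h2.2.2.2
      rw [hrun, PySem.Dict.contains_eq_isSome_get?, h] at hcf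
      simp at hcf
    · rw [PySem.Dict.get?_insert_of_ne _ _ (fun he => hrun he.symm)]
      exact h
  · exact h
  · exact h

lemma pvScanStep_get_none (t : List Char) (D : PySem.Dict String (Int × Int)) (σ : String)
    (j : Nat) (h : D.get? σ = none) :
    (pvScanStep t D (j : Int)).get? σ =
      if pvHitB t σ j = true then some (((j : Nat) : Int), ((pvRunEnd t (j + 10) : Nat) : Int) + 1)
      else none := by
  have htn : ((j : Int)).toNat = j := Int.toNat_natCast j
  simp only [pvScanStep, htn]
  by_cases h1 : PySem.Chars.startswith (t.drop j) "CANDIDATE ".toList = true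
  · rw [if_pos h1]
    by_cases hc : j + 10 < pvRunEnd t (j + 10) ∧ pvRunEnd t (j + 10) < t.length ∧
        t[pvRunEnd t (j + 10)]? = some ':' ∧
        D.contains (String.ofList (PySem.List.slice t (some (j + 10 : Nat)) (some (pvRunEnd t (j + 10) : Nat)))) = false
    · rw [if_pos hc]
      by_cases hrun : String.ofList (PySem.List.slice t (some (j + 10 : Nat)) (some (pvRunEnd t (j + 10) : Nat))) = σ
      · have hhit : pvHitB t σ j = true := by
          simp only [pvHitB, Bool.and_eq_true, decide_eq_true_eq, beq_iff_eq]
          exact ⟨⟨⟨⟨h1, hc.1⟩, hc.2.1⟩, hc.2.2.1⟩, hrun⟩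
        rw [if_pos hhit, hrun, PySem.Dict.get?_insert_self]
      · have hhit : ¬ pvHitB t σ j = true := by
          simp only [pvHitB, Bool.and_eq_true, decide_eq_true_eq, beq_iff_eq]
          intro hx
          exact hrun hx.2
        rw [if_neg hhit, PySem.Dict.get?_insert_of_ne _ _ (fun he => hrun he.symm)]
        exact h
    · rw [if_neg hc, h, if_neg]
      intro hhit
      simp only [pvHitB, Bool.and_eq_true, decide_eq_true_eq, beq_iff_eq] at hhit
      obtain ⟨⟨⟨⟨_, hq⟩, hr⟩, hcol⟩, hrun⟩ := hhit
      exact hc ⟨hq, hr, hcol, by rw [hrun, PySem.Dict.contains_eq_isSome_get?, h]; rfl⟩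
  · rw [if_neg h1, h, if_neg]
    intro hhit
    simp only [pvHitB, Bool.and_eq_true, decide_eq_true_eq, beq_iff_eq] at hhit
    exact h1 hhit.1.1.1.1

lemma pvScan_get_aux (t : List Char) (σ : String) : ∀ j, j ≤ t.length →
    ((PySem.List.pyRange 0 (j : Int) 1).foldl (pvScanStep t) PySem.Dict.empty).get? σ =
    ((List.range j).find? (pvHitB t σ)).map
      (fun (p : Nat) => ((p : Int), ((pvRunEnd t (p + 10) : Nat) : Int) + 1)) := by
  intro j
  induction j with
  | zero =>
    intro _
    simp [PySem.List.pyRange_one_eq_nil (by omega : (0:Int) ≤ 0), PySem.Dict.get?_empty]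
  | succ j ih =>
    intro hle
    have hys : ((j + 1 : Nat) : Int) = (j : Int) + 1 := by push_cast; ring
    rw [hys, PySem.List.pyRange_one_succ_right (by positivity), List.foldl_append,
        List.range_succ, List.find?_append]
    have ihj := ih (by omega)
    simp only [List.foldl_cons, List.foldl_nil]
    cases hprev : (List.range j).find? (pvHitB t σ) with
    | some p =>
      rw [hprev] at ihj
      rw [pvScanStep_get_some t _ _ σ _ ihj]
      rfl
    | none =>
      rw [hprev] at ihj
      rw [pvScanStep_get_none t _ σ j ihj]
      by_cases hhit : pvHitB t σ j = true
      · simp [hhit, List.find?_cons]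
      · simp [List.find?_cons, Bool.of_not_eq_true hhit]
 
lemma pvScan_get (t : List Char) (σ : String) :
    (pvScan t).get? σ =
    ((List.range t.length).find? (pvHitB t σ)).map
      (fun (p : Nat) => ((p : Int), ((pvRunEnd t (p + 10) : Nat) : Int) + 1)) :=
  pvScan_get_aux t σ t.length le_rfl


lemma pvMarker_assoc (i : Int) :
    pvMarker i = "CANDIDATE ".toList ++ (PySem.Int.toChars i ++ [':']) := by
  simp [pvMarker]

-- bridge: B's scan dict looked up at str(i) is A's find of the marker
lemma pvScan_get_marker (t : List Char) (i : Int) (hi : 1 ≤ i) :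
    (pvScan t).get? (PySem.Int.toStr i) =
      if PySem.Chars.find t (pvMarker i) = -1 then none
      else some (PySem.Chars.find t (pvMarker i),
                 PySem.Chars.find t (pvMarker i) + ((pvMarker i).length : Int)) := by
  have hs : PySem.Int.toChars i ≠ [] := pvToChars_ne_nil i hi
  have hd : ∀ c ∈ PySem.Int.toChars i, PySem.Chars.isdigit c = true := pvToChars_digits i hi
  have hσ : PySem.Int.toStr i = String.ofList (PySem.Int.toChars i) := rfl
  rw [hσ, pvScan_get]
  by_cases hf : PySem.Chars.find t (pvMarker i) = -1
  · rw [if_pos hf]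
    have hnin : ¬ (∃ j, pvMarker i <+: t.drop j) := by
      intro ⟨j, hj⟩
      have h1 : PySem.Chars.isIn (pvMarker i) t = true :=
        (PySem.Chars.exists_prefix_drop_iff_isIn _ _).mp ⟨j, hj⟩
      rw [PySem.Chars.isIn_iff_infix] at h1
      exact (PySem.Chars.find_eq_neg_one_iff _ _).mp hf h1
    rw [pvFind?_range_none]
    · rfl
    · intro p _
      apply Bool.of_not_eq_true
      intro hhit
      exact hnin ⟨p, by rw [pvMarker_assoc]; exact (pvHitB_iff t _ p hs hd).mp hhit⟩
  · rw [if_neg hf]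
    have hnn : 0 ≤ PySem.Chars.find t (pvMarker i) := by
      have := PySem.Chars.neg_one_le_find t (pvMarker i)
      omega
    obtain ⟨hpre, hmin⟩ := PySem.Chars.find_spec hnn
    set m := (PySem.Chars.find t (pvMarker i)).toNat with hm
    have hmarker_ne : pvMarker i ≠ [] := by simp [pvMarker]
    have hmlt : m < t.length := by
      by_contra hge
      rw [List.drop_eq_nil_of_le (by omega)] at hpre
      exact hmarker_ne (List.prefix_nil.mp hpre)
    have hhit : pvHitB t (String.ofList (PySem.Int.toChars i)) m = true := by
      rw [pvHitB_iff t _ m hs hd, ← pvMarker_assoc]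
      exact hpre
    have hmin' : ∀ p, p < m → pvHitB t (String.ofList (PySem.Int.toChars i)) p = false := by
      intro p hp
      apply Bool.of_not_eq_true
      intro hx
      exact hmin p hp (by rw [pvMarker_assoc]; exact (pvHitB_iff t _ p hs hd).mp hx)
    rw [pvFind?_range_some _ _ m hmlt hhit hmin']
    simp only [Option.map_some]
    obtain ⟨u0, hu0⟩ := hpre
    have hw10 : t.drop (m + 10) = PySem.Int.toChars i ++ ':' :: u0 := by
      rw [pvMarker_assoc] at hu0
      have h9 := pvDrop_pat t ((PySem.Int.toChars i ++ [':']) ++ u0) m (by rw [← hu0]; simp)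
      rw [h9]
      simp
    obtain ⟨hre, _, _⟩ := pvHit_facts t (PySem.Int.toChars i) _ m hd hw10
    rw [hre]
    have hfm : ((m : Nat) : Int) = PySem.Chars.find t (pvMarker i) := Int.toNat_of_nonneg hnn
    have hlm : ((pvMarker i).length : Int) = 10 + (PySem.Int.toChars i).length + 1 := by
      simp [pvMarker]
      push_cast
      ring
    congr 1
    rw [Prod.mk.injEq]
    constructor
    · exact hfm
    · rw [hlm, ← hfm]
      push_cast
      ring


-- dict built by an insert loop over enumerate: lookup = value at the LAST occurrence
lemma pvGet?_fold_enum (v : Int × String → String) (x : String) :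
    ∀ (ids : List String) (s : Int) (d : PySem.Dict String String),
    ((PySem.List.enumerate ids s).foldl (fun dd a => dd.insert a.2 (v a)) d).get? x =
    (match pvLastIdx ids x with
     | some j => some (v (s + (j : Int), x))
     | none => d.get? x) := by
  intro ids
  induction ids with
  | nil =>
    intro s d
    simp [PySem.List.enumerate, pvLastIdx]
  | cons y l ih =>
    intro s d
    rw [PySem.List.enumerate_cons, List.foldl_cons, ih]
    cases hl : pvLastIdx l x with
    | some j =>
      simp only [pvLastIdx, hl]
      congr 2
      · push_cast
        ring
    | none =>
      simp only [pvLastIdx, hl]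
      rw [PySem.Dict.get?_insert]
      by_cases hyx : y = x
      · subst hyx
        simp
      · simp [hyx, Ne.symm hyx]

-- stripping is unaffected by a trailing whitespace character
lemma pvStrip_concat_ws (w : List Char) (c : Char) (hc : PySem.Chars.isspace c = true) :
    PySem.Chars.strip (w ++ [c]) = PySem.Chars.strip w := by
  simp only [PySem.Chars.strip, PySem.Chars.lstrip, PySem.Chars.rstrip]
  rw [List.dropWhile_append]
  cases hlw : w.dropWhile PySem.Chars.isspace with
  | nil => simp [hlw, List.dropWhile_cons, hc]
  | cons a u =>
    simp only [hlw, List.isEmpty_cons, if_false, Bool.false_eq_true]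
    rw [List.reverse_append, List.reverse_singleton, List.singleton_append,
        List.dropWhile_cons, hc]
    simp

-- slicing with Python's -1 bound
lemma pvSlice_neg_one (t : List Char) (s0 : Nat) (hn : 0 < t.length) :
    PySem.List.slice t (some (s0 : Int)) (some (-1)) = (t.drop s0).take (t.length - 1 - s0) := by
  simp only [PySem.List.slice, PySem.List.clampIdx]
  rw [if_neg (by omega : ¬ ((s0 : Int) < 0)), if_pos (by omega : (-1 : Int) < 0),
      if_neg (by omega : ¬ ((t.length : Int) + (-1) < 0))]
  have h1 : ((t.length : Int) + (-1)).toNat = t.length - 1 := by omega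
  rw [h1]
  simp only [Int.toNat_natCast]
  by_cases hs : s0 ≤ t.length
  · have h2 : min s0 t.length = s0 := by omega
    rw [h2]
  · have h2 : min s0 t.length = t.length := by omega
    rw [h2, List.drop_eq_nil_of_le (by omega : t.length ≤ s0),
        List.drop_eq_nil_of_le (le_refl t.length)]
    simp

-- A's slice-to-(-1) equals B's slice-to-end outside the difference region
lemma pvSliceStrip_eq (t : List Char) (s0 : Nat) (hle : s0 ≤ t.length)
    (h : ¬ (s0 < t.length ∧ PySem.Chars.isspace (t.getLastD ' ') = false)) :
    PySem.Chars.strip (PySem.List.slice t (some (s0 : Int)) (some (-1))) =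
    PySem.Chars.strip (PySem.List.slice t (some (s0 : Int)) (some (t.length : Int))) := by
  by_cases hs0 : s0 < t.length
  · have hws : PySem.Chars.isspace (t.getLastD ' ') = true := by
      rcases Bool.eq_false_or_eq_true (PySem.Chars.isspace (t.getLastD ' ')) with hb | hb
      · exact hb
      · exact absurd ⟨hs0, hb⟩ h
    have hn0 : 0 < t.length := by omega
    have htne : t ≠ [] := by
      intro he
      rw [he] at hn0
      simp at hn0
    set u := t.drop s0 with hu
    have hulen : u.length = t.length - s0 := by simp [hu]
    have hune : u ≠ [] := by
      intro he
      have := congrArg List.length he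
      rw [hulen] at this
      simp at this
      omega
    have hsl1 : PySem.List.slice t (some (s0 : Int)) (some (-1)) = u.dropLast := by
      rw [pvSlice_neg_one t s0 hn0, List.dropLast_eq_take, ← hu]
      congr 1
      omega
    have hsl2 : PySem.List.slice t (some (s0 : Int)) (some (t.length : Int)) = u := by
      rw [pvSlice_natCast, ← hu]
      exact List.take_of_length_le (by omega)
    rw [hsl1, hsl2]
    have hlast : u.getLast hune = t.getLast htne := List.getLast_drop hune
    have hcws : PySem.Chars.isspace (u.getLast hune) = true := by
      rw [hlast]
      rw [List.getLastD_eq_getLast?, List.getLast?_eq_some_getLast htne] at hws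
      exact hws
    conv_rhs => rw [← List.dropLast_concat_getLast hune]
    rw [pvStrip_concat_ws _ _ hcws]
  · have hs0' : s0 = t.length := by omega
    subst hs0'
    have h1 : PySem.List.slice t (some (t.length : Int)) (some (-1)) = [] := by
      apply List.eq_nil_of_length_eq_zero
      rw [PySem.List.length_slice]
      have h3 : PySem.List.clampIdx t.length (-1) ≤ t.length := PySem.List.clampIdx_le _ _
      have h2 : PySem.List.clampIdx t.length (t.length : Int) = t.length := by
        rw [PySem.List.clampIdx_natCast]
        omega
      omega
    have h2 : PySem.List.slice t (some (t.length : Int)) (some (t.length : Int)) = [] := by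
      rw [pvSlice_natCast]
      simp
    rw [h1, h2]


-- an occurrence of a nonempty pattern that ends before the last character ↔ `sub in t[:-1]`
lemma pvIsIn_dropLast_iff (t m : List Char) (hne : m ≠ []) :
    PySem.Chars.isIn m t.dropLast = true ↔ ∃ p, m <+: t.drop p ∧ p + m.length < t.length := by
  rw [← PySem.Chars.exists_prefix_drop_iff_isIn]
  constructor
  · intro ⟨p, hp⟩
    rw [List.dropLast_eq_take, List.drop_take] at hp
    obtain ⟨h1, h2⟩ := List.prefix_take_iff.mp hp
    have hml : 0 < m.length := List.length_pos_iff.mpr hne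
    have hpn : p + 1 ≤ t.length := by omega
    exact ⟨p, h1, by omega⟩
  · intro ⟨p, hp, hlt⟩
    refine ⟨p, ?_⟩
    rw [List.dropLast_eq_take, List.drop_take]
    exact List.prefix_take_iff.mpr ⟨hp, by omega⟩

lemma pvStrip_concat_not_ws (w : List Char) (c : Char) (hc : PySem.Chars.isspace c = false) :
    PySem.Chars.strip w ≠ PySem.Chars.strip (w ++ [c]) := by
  simp only [PySem.Chars.strip, PySem.Chars.lstrip, PySem.Chars.rstrip]
  rw [List.dropWhile_append]
  cases hlw : w.dropWhile PySem.Chars.isspace with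
  | nil =>
    simp only [hlw, List.isEmpty_nil, if_true]
    rw [List.dropWhile_cons]
    simp [hc]
  | cons a u =>
    simp only [hlw, List.isEmpty_cons, if_false, Bool.false_eq_true]
    intro heq
    have h2 : ((a :: u) ++ [c]).reverse = c :: (a :: u).reverse := by simp
    rw [h2, List.dropWhile_cons, hc] at heq
    simp only [Bool.false_eq_true, if_false] at heq
    have hlen := congrArg List.length heq
    have h1 := List.length_dropWhile_le PySem.Chars.isspace (a :: u).reverse
    simp only [List.length_reverse, List.length_cons] at hlen h1
    omega

lemma pvLastIdx_none_of_not_mem (x : String) : ∀ (l : List String), x ∉ l → pvLastIdx l x = none := by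
  intro l
  induction l with
  | nil => intro _; rfl
  | cons y l ih =>
    intro h
    have hy : y ≠ x := fun he => h (by simp [he])
    have hl : x ∉ l := fun hm => h (by simp [hm])
    simp [pvLastIdx, ih hl, hy]

lemma pvLastIdx_of (x : String) : ∀ (ids : List String) (j : Nat), j < ids.length →
    ids.getD j "" = x → x ∉ ids.drop (j + 1) → pvLastIdx ids x = some j := by
  intro ids
  induction ids with
  | nil => intro j h; simp at h
  | cons y l ih =>
    intro j hj hx hnd
    cases j with
    | zero =>
      simp only [List.getD_cons_zero] at hx
      have hnl : x ∉ l := by simpa using hnd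
      simp [pvLastIdx, pvLastIdx_none_of_not_mem x l hnl, hx]
    | succ j =>
      have hj' : j < l.length := by simpa using hj
      have hx' : l.getD j "" = x := by simpa using hx
      have hnd' : x ∉ l.drop (j + 1) := by simpa using hnd
      simp [pvLastIdx, ih j hj' hx' hnd']


-- per-iteration values of the two programs
def pvVA (t : List Char) (k : Nat) (fbd : PySem.Dict String String) (p : Int × String) : String :=
  if PySem.Chars.find t (pvMarker p.1) = -1 then fbd.getD p.2 ""
  else String.ofList (PySem.Chars.strip (PySem.List.slice t
    (some (PySem.Chars.find t (pvMarker p.1) + ((pvMarker p.1).length : Int)))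
    (some (if p.1 < (k : Int) then PySem.Chars.find t (pvMarker (p.1 + 1)) else (t.length : Int)))))

def pvVB (t : List Char) (k : Nat) (fbd : PySem.Dict String String) (p : Int × String) : String :=
  match (pvScan t).get? (PySem.Int.toStr p.1) with
  | none => fbd.getD p.2 ""
  | some m => String.ofList (PySem.Chars.strip (PySem.List.slice t (some m.2)
      (some (if p.1 < (k : Int) then
               match (pvScan t).get? (PySem.Int.toStr (p.1 + 1)) with
               | some nxt => nxt.1
               | none => (t.length : Int)
             else (t.length : Int)))))

lemma pvA_normal (rt : String) (ids : List String) (fb : List (String × String)) :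
    parse_evidence_response_py rt ids fb =
    ((PySem.List.enumerate ids 1).foldl
      (fun em p => em.insert p.2 (pvVA rt.toList ids.length (PySem.Dict.ofList fb) p))
      PySem.Dict.empty).items := by
  simp only [parse_evidence_response_py]
  refine congrArg PySem.Dict.items ?_
  refine congrArg (fun f => List.foldl f PySem.Dict.empty (PySem.List.enumerate ids 1)) ?_
  funext em p
  by_cases h : PySem.Chars.find rt.toList (pvMarker p.1) = -1
  · simp [pvVA, h]
  · simp [pvVA, h]

lemma pvB_normal (rt : String) (ids : List String) (fb : List (String × String)) :
    parse_evidence_response_py_alt rt ids fb =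
    ((PySem.List.enumerate ids 1).foldl
      (fun em p => em.insert p.2 (pvVB rt.toList ids.length (PySem.Dict.ofList fb) p))
      PySem.Dict.empty).items := by
  simp only [parse_evidence_response_py_alt]
  refine congrArg PySem.Dict.items ?_
  refine congrArg (fun f => List.foldl f PySem.Dict.empty (PySem.List.enumerate ids 1)) ?_
  funext res p
  cases hm : (pvScan rt.toList).get? (PySem.Int.toStr p.1) with
  | none => simp [pvVB, hm]
  | some m => simp [pvVB, hm]

-- the crux: at the last occurrence of an id, the two per-iteration values agree outside D_
lemma pvVal_eq (rt : String) (ids : List String) (fb : List (String × String))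
    (hnd : ¬ D_parse_evidence_response_py rt ids fb) (j : Nat) (hj : j < ids.length)
    (hlast : ids.getD j "" ∉ ids.drop (j + 1)) :
    pvVA rt.toList ids.length (PySem.Dict.ofList fb) (1 + (j : Int), ids.getD j "") =
    pvVB rt.toList ids.length (PySem.Dict.ofList fb) (1 + (j : Int), ids.getD j "") := by
  set t := rt.toList with ht
  have hi1 : (1 : Int) ≤ 1 + (j : Int) := by omega
  simp only [pvVA, pvVB]
  rw [pvScan_get_marker t (1 + (j : Int)) hi1]
  by_cases hf : PySem.Chars.find t (pvMarker (1 + (j : Int))) = -1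
  · simp [hf]
  · simp only [if_neg hf]
    try dsimp only
    by_cases hik : (1 + (j : Int)) < (ids.length : Int)
    · rw [if_pos hik, if_pos hik]
      rw [pvScan_get_marker t (1 + (j : Int) + 1) (by omega)]
      by_cases hf2 : PySem.Chars.find t (pvMarker (1 + (j : Int) + 1)) = -1
      · rw [if_pos hf2, hf2]
        try dsimp only
        -- ¬ D_ rules out the region where the two slices differ
        have hc1 : j + 1 < ids.length := by
          have := hik
          omega
        have hc4 : PySem.Chars.isIn (pvMarker ((j : Int) + 2)) t = false := by
          rw [(by ring : (j : Int) + 2 = 1 + (j : Int) + 1), PySem.Chars.isIn_eq_false_iff]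
          exact (PySem.Chars.find_eq_neg_one_iff t _).mp hf2
        have hnn : 0 ≤ PySem.Chars.find t (pvMarker (1 + (j : Int))) := by
          have := PySem.Chars.neg_one_le_find t (pvMarker (1 + (j : Int)))
          omega
        set f0 := PySem.Chars.find t (pvMarker (1 + (j : Int))) with hf0
        set s0 : Nat := f0.toNat + (pvMarker (1 + (j : Int))).length with hs0
        have hcast : f0 + ((pvMarker (1 + (j : Int))).length : Int) = ((s0 : Nat) : Int) := by
          rw [hs0]
          push_cast
          rw [Int.toNat_of_nonneg hnn]
        have hle : s0 ≤ t.length := by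
          obtain ⟨hpre, _⟩ := PySem.Chars.find_spec hnn
          have := hpre.length_le
          rw [List.length_drop] at this
          have hfl : f0.toNat ≤ t.length := by
            have := PySem.Chars.find_le_length t (pvMarker (1 + (j : Int)))
            omega
          omega
        have hrest : ¬ (s0 < t.length ∧ PySem.Chars.isspace (t.getLastD ' ') = false) := by
          intro hcon
          have hpre := (PySem.Chars.find_spec hnn).1
          have hin : PySem.Chars.isIn (pvMarker (1 + (j : Int))) t.dropLast = true := by
            rw [pvIsIn_dropLast_iff t _ (by simp [pvMarker])]
            exact ⟨f0.toNat, hpre, by omega⟩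
          exact hnd ⟨j, List.mem_range.mpr hj, hc1, hlast,
            by rw [(by ring : (j : Int) + 1 = 1 + (j : Int))]; exact hin, hc4, hcon.2⟩
        congr 1
        rw [hcast]
        exact pvSliceStrip_eq t s0 hle hrest
      · rw [if_neg hf2]
        try dsimp only
    · rw [if_neg hik, if_neg hik]


-- ===== VERDICT (by name: the statement is the Claim_ definition above) =====
theorem parse_evidence_response_py_spec : Claim_unchanged_parse_evidence_response_py := by
  intro rt ids fb _hdom hnd
  rw [pvA_normal, pvB_normal]
  set t := rt.toList with ht
  set k := ids.length with hk
  set fbd := PySem.Dict.ofList fb with hfbd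
  set vA := pvVA t k fbd with hvA
  set vB := pvVB t k fbd with hvB
  have hnodA : ((PySem.List.enumerate ids 1).foldl (fun em p => em.insert p.2 (vA p)) PySem.Dict.empty).keys.Nodup :=
    PySem.Dict.nodup_keys_foldl_insert_key _ (fun p => p.2) (fun _ p => vA p) _ PySem.Dict.nodup_keys_empty
  have hnodB : ((PySem.List.enumerate ids 1).foldl (fun em p => em.insert p.2 (vB p)) PySem.Dict.empty).keys.Nodup :=
    PySem.Dict.nodup_keys_foldl_insert_key _ (fun p => p.2) (fun _ p => vB p) _ PySem.Dict.nodup_keys_empty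
  rw [PySem.Dict.items_eq_map_keys _ hnodA "", PySem.Dict.items_eq_map_keys _ hnodB ""]
  have hkeys : ((PySem.List.enumerate ids 1).foldl (fun em p => em.insert p.2 (vA p)) PySem.Dict.empty).keys =
      ((PySem.List.enumerate ids 1).foldl (fun em p => em.insert p.2 (vB p)) PySem.Dict.empty).keys := by
    rw [PySem.Dict.keys_foldl_insert_key _ (fun p => p.2) (fun _ p => vA p) _,
        PySem.Dict.keys_foldl_insert_key _ (fun p => p.2) (fun _ p => vB p) _]
  rw [hkeys]
  apply List.map_congr_left
  intro x _hx
  rw [PySem.Dict.getD_eq_get?_getD, PySem.Dict.getD_eq_get?_getD,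
      pvGet?_fold_enum vA x ids 1 PySem.Dict.empty, pvGet?_fold_enum vB x ids 1 PySem.Dict.empty]
  cases hl : pvLastIdx ids x with
  | none => simp [hl]
  | some j =>
    obtain ⟨hj, hx2, hx3⟩ := pvLastIdx_spec x ids j hl
    simp only [hl]
    have hval := pvVal_eq rt ids fb hnd j hj (hx2 ▸ hx3)
    rw [← hx2]
    rw [hvA, hvB, ht, hk, hfbd]
    rw [hval]

theorem parse_evidence_response_py_tight : Claim_exact_parse_evidence_response_py := by
  unfold Claim_exact_parse_evidence_response_py
  intro rt ids fb _dom hD heq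
  obtain ⟨j, hjm, hc1, hlast, hin, hc4, hws⟩ := hD
  have hj : j < ids.length := List.mem_range.mp hjm
  set t := rt.toList with ht
  set x := ids.getD j "" with hx
  have hi1 : (1 : Int) ≤ 1 + (j : Int) := by omega
  rw [pvA_normal, pvB_normal] at heq
  have hget := congrArg (fun d => PySem.Dict.get? d x) (PySem.Dict.ext heq)
  simp only at hget
  rw [pvGet?_fold_enum, pvGet?_fold_enum, pvLastIdx_of x ids j hj hx.symm hlast] at hget
  dsimp only at hget
  have hveq := Option.some.inj hget
  -- marker facts
  rw [(by ring : (j : Int) + 1 = 1 + (j : Int))] at hin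
  obtain ⟨p, hp, hplen⟩ := (pvIsIn_dropLast_iff t _ (by simp [pvMarker])).mp hin
  have hisin : PySem.Chars.isIn (pvMarker (1 + (j : Int))) t = true :=
    (PySem.Chars.exists_prefix_drop_iff_isIn _ _).mp ⟨p, hp⟩
  have hf : ¬ PySem.Chars.find t (pvMarker (1 + (j : Int))) = -1 := by
    rw [PySem.Chars.find_eq_neg_one_iff]
    intro hni
    exact hni ((PySem.Chars.isIn_iff_infix _ _).mp hisin)
  have hf2 : PySem.Chars.find t (pvMarker (1 + (j : Int) + 1)) = -1 := by
    rw [PySem.Chars.find_eq_neg_one_iff]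
    rw [(by ring : (j : Int) + 2 = 1 + (j : Int) + 1), PySem.Chars.isIn_eq_false_iff] at hc4
    exact hc4
  have hik : (1 + (j : Int)) < (ids.length : Int) := by omega
  have hnn : 0 ≤ PySem.Chars.find t (pvMarker (1 + (j : Int))) := by
    have := PySem.Chars.neg_one_le_find t (pvMarker (1 + (j : Int)))
    omega
  set f0 := PySem.Chars.find t (pvMarker (1 + (j : Int))) with hf0
  set s0 : Nat := f0.toNat + (pvMarker (1 + (j : Int))).length with hs0
  have hple : f0.toNat ≤ p := by
    by_contra hgt
    exact (PySem.Chars.find_spec hnn).2 p (by omega) hp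
  have hs0n : s0 < t.length := by
    have : (pvMarker (1 + (j : Int))).length = (pvMarker (1 + (j : Int))).length := rfl
    omega
  have hcast : f0 + ((pvMarker (1 + (j : Int))).length : Int) = ((s0 : Nat) : Int) := by
    rw [hs0]
    push_cast
    rw [Int.toNat_of_nonneg hnn]
  -- compute the two values
  have hvA : pvVA t ids.length (PySem.Dict.ofList fb) (1 + (j : Int), x) =
      String.ofList (PySem.Chars.strip (PySem.List.slice t (some ((s0 : Nat) : Int)) (some (-1)))) := by
    simp only [pvVA]
    rw [if_neg hf, if_pos hik, hf2, hcast]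
  have hvB : pvVB t ids.length (PySem.Dict.ofList fb) (1 + (j : Int), x) =
      String.ofList (PySem.Chars.strip (PySem.List.slice t (some ((s0 : Nat) : Int)) (some (t.length : Int)))) := by
    simp only [pvVB]
    rw [pvScan_get_marker t (1 + (j : Int)) hi1, if_neg hf]
    try dsimp only
    rw [if_pos hik, pvScan_get_marker t (1 + (j : Int) + 1) (by omega), if_pos hf2]
    try dsimp only
    rw [hcast]
  rw [hvA, hvB] at hveq
  have hstrip := congrArg String.toList hveq
  simp only [String.toList_ofList] at hstrip
  -- but the two stripped slices differ
  have hn0 : 0 < t.length := by omega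
  set u := t.drop s0 with hu
  have hulen : u.length = t.length - s0 := by simp [hu]
  have hune : u ≠ [] := by
    intro he
    have := congrArg List.length he
    rw [hulen] at this
    simp at this
    omega
  have htne : t ≠ [] := by
    intro he
    rw [he] at hn0
    simp at hn0
  have hsl1 : PySem.List.slice t (some ((s0 : Nat) : Int)) (some (-1)) = u.dropLast := by
    rw [pvSlice_neg_one t s0 hn0, List.dropLast_eq_take, ← hu]
    congr 1
    omega
  have hsl2 : PySem.List.slice t (some ((s0 : Nat) : Int)) (some (t.length : Int)) = u := by
    rw [pvSlice_natCast, ← hu]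
    exact List.take_of_length_le (by omega)
  rw [hsl1, hsl2] at hstrip
  have hlastc : PySem.Chars.isspace (u.getLast hune) = false := by
    rw [List.getLast_drop hune]
    rw [List.getLastD_eq_getLast?, List.getLast?_eq_some_getLast htne] at hws
    exact hws
  have := pvStrip_concat_not_ws u.dropLast (u.getLast hune) hlastc
  rw [List.dropLast_concat_getLast hune] at this
  exact this hstrip

theorem parse_evidence_response_py_changed : Claim_changed_parse_evidence_response_py := by
  unfold Claim_changed_parse_evidence_response_py; decide
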